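-- pv_equiv track=rewrite | github.com/NLNZDigitalPreservation/nlnz-tools-scripts-ingestion | reports/daily-file-usage-report.py | convert_to_filename
-- ===== SOURCE A (Python) =====
-- FILENAME_UNSAFE_CHARACTERS = " *$"
--
-- REPLACEMENT_FILENAME_SAFE_CHARACTER = "-"
--
-- FILE_PATH_SEPARATORS = "/\\"
--
-- REPLACEMENT_FILE_PATH_SEPARATOR = "_"
--
-- def convert_to_filename(file_path_string):
--     safe_filename = file_path_string
--     if safe_filename.startswith("/"):
--         safe_filename = safe_filename[1:]
--     for file_path_separator_character in FILE_PATH_SEPARATORS: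
--         safe_filename = safe_filename.replace(file_path_separator_character, REPLACEMENT_FILE_PATH_SEPARATOR)
--     for unsafe_character in FILENAME_UNSAFE_CHARACTERS:
--         safe_filename = safe_filename.replace(unsafe_character, REPLACEMENT_FILENAME_SAFE_CHARACTER)
--
--     return safe_filename
-- ===== SOURCE B (Python) =====
-- FILENAME_UNSAFE_CHARACTERS = " *$"
-- REPLACEMENT_FILENAME_SAFE_CHARACTER = "-"
-- FILE_PATH_SEPARATORS = "/\\"
-- REPLACEMENT_FILE_PATH_SEPARATOR = "_"
--
-- _CHAR_MAP = {"/": "_", "\\": "_", " ": "-", "*": "-", "$": "-"}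
--
-- def convert_to_filename(file_path_string):
--     rest = file_path_string[1:] if file_path_string.startswith("/") else file_path_string
--     return "".join(_CHAR_MAP.get(ch, ch) for ch in rest)
-- ===== Notes on version B (the rewrite author's own statement) =====
-- stated objective: simpler
-- what changed: Replaces five sequential whole-string replace() scans with a single pass over the characters using a lookup table of replacements.
import Mathlib
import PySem

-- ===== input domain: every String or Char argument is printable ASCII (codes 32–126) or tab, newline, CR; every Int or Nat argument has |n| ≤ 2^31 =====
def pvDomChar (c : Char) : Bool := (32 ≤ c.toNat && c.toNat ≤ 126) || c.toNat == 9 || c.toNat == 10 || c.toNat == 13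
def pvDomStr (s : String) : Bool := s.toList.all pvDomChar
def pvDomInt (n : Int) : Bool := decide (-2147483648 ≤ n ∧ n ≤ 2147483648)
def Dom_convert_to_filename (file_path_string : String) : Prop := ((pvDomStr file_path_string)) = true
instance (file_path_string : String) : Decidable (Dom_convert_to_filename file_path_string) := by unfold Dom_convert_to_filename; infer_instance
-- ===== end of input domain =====

-- B is a simpler single-pass rewrite: one character-map lookup per char instead of five whole-string replace scans; return value proved equal.

-- ===== PORT A =====
def convert_to_filename (file_path_string : String) : String :=
  let safe0 := file_path_string
  let safe1 := if PySem.Str.startswith safe0 "/" then PySem.Str.slice safe0 (some 1) none else safe0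
  let safe2 := "/\\".toList.foldl
    (fun acc sep => PySem.Str.replace acc (String.ofList [sep]) "_") safe1
  let safe3 := " *$".toList.foldl
    (fun acc uns => PySem.Str.replace acc (String.ofList [uns]) "-") safe2
  safe3

-- ===== PORT B =====
def pvCharMap : PySem.Dict Char Char :=
  PySem.Dict.ofList [('/', '_'), ('\\', '_'), (' ', '-'), ('*', '-'), ('$', '-')]

def convert_to_filename_alt (file_path_string : String) : String :=
  let rest := if PySem.Str.startswith file_path_string "/"
              then PySem.Str.slice file_path_string (some 1) none
              else file_path_string
  String.ofList (rest.toList.map (fun ch => PySem.Dict.getD pvCharMap ch ch))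

-- ===== PRECONDITION & SPEC =====
def Spec_convert_to_filename (file_path_string : String) (out : String) : Prop := out = convert_to_filename_alt file_path_string
instance (file_path_string : String) (out : String) : Decidable (Spec_convert_to_filename file_path_string out) := by unfold Spec_convert_to_filename; infer_instance

-- ===== CLAIM (what is proved, stated in full; the proofs are below) =====
def Claim_equal_convert_to_filename : Prop := ∀ (file_path_string : String), Dom_convert_to_filename file_path_string → Spec_convert_to_filename file_path_string (convert_to_filename file_path_string)

-- ===== LEMMAS AND PROOFS =====

-- single-character replace is a map
theorem replace_go_single (c r : Char) :
    ∀ (l : List Char) (fuel : Nat) (acc : List Char), l.length ≤ fuel →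
      PySem.Chars.replace.go [c] [r] fuel l acc
        = acc.reverse ++ l.map (fun x => if x = c then r else x) := by
  intro l
  induction l with
  | nil =>
      intro fuel acc _
      cases fuel <;> simp [PySem.Chars.replace.go]
  | cons hd tl ih =>
      intro fuel acc hlen
      cases fuel with
      | zero => simp at hlen
      | succ f =>
          simp only [PySem.Chars.replace.go]
          by_cases h : hd = c
          · subst h
            have : List.isPrefixOf [hd] (hd :: tl) = true := by
              simp [List.isPrefixOf]
            rw [if_pos this]
            have := ih f ([r].reverse ++ acc) (by simpa using Nat.le_of_succ_le_succ hlen)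
            simpa using this
          · have : List.isPrefixOf [c] (hd :: tl) = false := by
              simp [List.isPrefixOf]
              intro hc; exact absurd hc.symm h
            rw [if_neg (by simp [this])]
            have := ih f (hd :: acc) (Nat.le_of_succ_le_succ hlen)
            simp [this, h]

theorem replace_single (cs : List Char) (c r : Char) :
    PySem.Chars.replace cs [c] [r] = cs.map (fun x => if x = c then r else x) := by
  simpa [PySem.Chars.replace] using replace_go_single c r cs cs.length [] (le_refl _)

theorem charmap_eval (x : Char) : pvCharMap.getD x x =
    (fun x => if x = '$' then '-' else x) ((fun x => if x = '*' then '-' else x)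
    ((fun x => if x = ' ' then '-' else x) ((fun x => if x = '\\' then '_' else x)
    ((fun x => if x = '/' then '_' else x) x)))) := by
  have h : pvCharMap.items = [('/', '_'), ('\\', '_'), (' ', '-'), ('*', '-'), ('$', '-')] := by decide
  simp [PySem.Dict.getD, PySem.Dict.get?, h, List.find?]
  by_cases h1 : x = '/' <;> by_cases h2 : x = '\\' <;>
    by_cases h3 : x = ' ' <;> by_cases h4 : x = '*' <;> by_cases h5 : x = '$' <;>
    simp_all
  have e1 : ('/' == x) = false := by simpa using fun e => h1 e.symm
  have e2 : ('\\' == x) = false := by simpa using fun e => h2 e.symm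
  have e3 : (' ' == x) = false := by simpa using fun e => h3 e.symm
  have e4 : ('*' == x) = false := by simpa using fun e => h4 e.symm
  have e5 : ('$' == x) = false := by simpa using fun e => h5 e.symm
  simp [e1, e2, e3, e4, e5]

set_option maxHeartbeats 1000000 in
theorem convert_to_filename_spec : Claim_equal_convert_to_filename := by
  intro s _
  unfold Spec_convert_to_filename convert_to_filename convert_to_filename_alt
  simp only []
  set rest := if PySem.Str.startswith s "/" then PySem.Str.slice s (some 1) none else s with hrest
  simp [PySem.Str.replace, replace_single]
  congr 1
  apply List.map_congr_left
  intro x _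
  simp only [Function.comp]
  exact (charmap_eval x).symm
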